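-- pv_equiv track=rewrite | github.com/GeorgiosAlpogiannis/CANOpen-Automation-Project | Serial_Interface_Automation_VnV_Tool/Test_Functions.py | power_sum
-- ===== SOURCE A (Python) =====
-- def power_sum(DO_nr):
--
--     DO_Sum_Tot =1 #2^0
--     k = 1
--     while k < DO_nr:
--         answer = 2
--         increment = 2
--         i = 1
--         while i < k:
--             j = 1
--             while j < 2: #2 for binary
--                 answer = answer + increment
--                 j += 1
--             increment = answer
--             i+=1
--         DO_Sum_Tot = DO_Sum_Tot + answer
--         k +=1
--     return DO_Sum_Tot
-- ===== SOURCE B (Python) =====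
-- def power_sum(DO_nr):
--     return 1 if DO_nr < 1 else 2 ** DO_nr - 1
-- ===== Notes on version B (the rewrite author's own statement) =====
-- stated objective: faster
-- what changed: Replaced the three nested while loops (which rebuild 2^k by repeated addition for every k) with the closed form 2**DO_nr - 1 (1 when DO_nr < 1).
import Mathlib
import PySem

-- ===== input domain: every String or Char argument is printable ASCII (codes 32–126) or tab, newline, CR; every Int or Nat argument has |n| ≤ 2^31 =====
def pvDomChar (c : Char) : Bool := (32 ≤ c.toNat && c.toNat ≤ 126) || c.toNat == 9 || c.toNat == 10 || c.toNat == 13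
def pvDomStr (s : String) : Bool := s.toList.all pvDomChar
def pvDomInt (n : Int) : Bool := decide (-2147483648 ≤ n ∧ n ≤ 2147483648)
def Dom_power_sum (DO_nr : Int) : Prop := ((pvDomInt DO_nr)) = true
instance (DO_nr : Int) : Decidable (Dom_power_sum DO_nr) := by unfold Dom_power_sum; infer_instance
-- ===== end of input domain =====

-- ===== PORT A =====
-- while j < 2: answer = answer + increment; j += 1
def pvLoopJ (answer increment j : Int) : Int :=
  if j < 2 then pvLoopJ (answer + increment) increment (j + 1) else answer
termination_by (2 - j).toNat
decreasing_by omega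

-- while i < k: (inner j-loop); increment = answer; i += 1
def pvLoopI (answer increment i k : Int) : Int :=
  if i < k then
    let a := pvLoopJ answer increment 1
    pvLoopI a a (i + 1) k
  else answer
termination_by (k - i).toNat
decreasing_by omega

-- while k < DO_nr: answer := inner loops starting from 2,2,1; total += answer; k += 1
def pvLoopK (total k DO_nr : Int) : Int :=
  if k < DO_nr then pvLoopK (total + pvLoopI 2 2 1 k) (k + 1) DO_nr else total
termination_by (DO_nr - k).toNat
decreasing_by omega

def power_sum (DO_nr : Int) : Int := pvLoopK 1 1 DO_nr

-- ===== PORT B =====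
def power_sum_alt (DO_nr : Int) : Int :=
  if DO_nr < 1 then 1 else 2 ^ DO_nr.toNat - 1

-- ===== PRECONDITION & SPEC =====
def Spec_power_sum (DO_nr : Int) (out : Int) : Prop := out = power_sum_alt DO_nr
instance (DO_nr : Int) (out : Int) : Decidable (Spec_power_sum DO_nr out) := by unfold Spec_power_sum; infer_instance

-- ===== CLAIM (what is proved, stated in full; the proofs are below) =====
def Claim_equal_power_sum : Prop := ∀ (DO_nr : Int), Dom_power_sum DO_nr → Spec_power_sum DO_nr (power_sum DO_nr)

-- ===== LEMMAS AND PROOFS =====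

-- ===== VERDICT (by name: the statement is the Claim_ definition above) =====
lemma pvLoopJ_one (a inc : Int) : pvLoopJ a inc 1 = a + inc := by
  rw [pvLoopJ]; norm_num; rw [pvLoopJ]; norm_num

lemma pvLoopI_closed (n : Nat) : ∀ a i k : Int, i + n = k → pvLoopI a a i k = a * 2 ^ n := by
  induction n with
  | zero => intro a i k h; rw [pvLoopI]; simp; omega
  | succ n ih =>
    intro a i k h
    rw [pvLoopI]
    have hik : i < k := by omega
    simp [hik, pvLoopJ_one]
    rw [show a + a = 2 * a by ring]
    rw [ih (2 * a) (i + 1) k (by omega)]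
    ring

lemma pvLoopK_closed (n : Nat) : ∀ t k D : Int, 1 ≤ k → k + n = D →
    pvLoopK t k D = t + (2 ^ (k + n).toNat - 2 ^ k.toNat) := by
  induction n with
  | zero => intro t k D h1 h2; rw [pvLoopK]; simp; omega
  | succ n ih =>
    intro t k D h1 h2
    rw [pvLoopK]
    have hkD : k < D := by omega
    simp only [hkD, if_true]
    have hI : pvLoopI 2 2 1 k = 2 * 2 ^ (k - 1).toNat :=
      pvLoopI_closed (k - 1).toNat 2 1 k (by omega)
    rw [hI, ih (t + 2 * 2 ^ (k - 1).toNat) (k + 1) D (by omega) (by omega)]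
    have e1 : (k + 1 + (n : Int)).toNat = (k + (n + 1 : Nat)).toNat := by omega
    have e2 : (k + 1).toNat = (k - 1).toNat + 2 := by omega
    have e3 : k.toNat = (k - 1).toNat + 1 := by omega
    rw [e1, e2, e3]
    ring

-- ===== VERDICT (by name: the statement is the Claim_ definition above) =====
theorem power_sum_spec : Claim_equal_power_sum := by
  intro D _
  unfold Spec_power_sum power_sum power_sum_alt
  by_cases hD : D < 1
  · rw [pvLoopK]
    have : ¬ (1 < D) := by omega
    simp [this, hD]
  · have h1 : (1 : Int) ≤ D := by omega
    rw [pvLoopK_closed (D - 1).toNat 1 1 D le_rfl (by omega)]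
    have : ((1 : Int) + ((D - 1).toNat : Int)).toNat = D.toNat := by omega
    rw [this]
    simp [hD]
    have hd1 : D.toNat = (D.toNat - 1) + 1 := by omega
    rw [hd1]
    push_cast [pow_succ]
    ring
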